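-- pv_equiv track=rewrite | github.com/wakakap/do_with_file- | niconico/function_v1.py | _calculate_layout
-- ===== SOURCE A (Python) =====
-- def _calculate_layout(comments_to_place, screen_w, screen_h):
--     """
--     核心布局算法：将弹幕从左下角开始进行堆叠排列
--     输入: comments_to_place (一个列表，元素为 (文本, 宽度, 高度, 原始对象))
--     返回: 一个字典 {文本: (x, y)}
--     """
--     positions = {}
--     # 按弹幕高度（或面积）降序排序，大的先放
--     comments_to_place.sort(key=lambda item: item[2], reverse=True)
--
--     margin = 10  # 弹幕离屏幕边缘的距离
--     spacing = 5    # 弹幕之间的间距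
--
--     cursor_x = margin
--     # Y坐标从屏幕底部开始，减去行高
--     cursor_y = screen_h - margin
--     row_height = 0
--
--     for text, w, h, _ in comments_to_place:
--         if cursor_x + w > screen_w - margin:
--             # 当前行空间不足，换行
--             cursor_x = margin
--             cursor_y -= (row_height + spacing)
--             row_height = 0
--
--         # 使用 \an7 (左下角对齐)，所以坐标就是弹幕的左下角点
--         positions[text] = (cursor_x, cursor_y)
--
--         cursor_x += w + spacing
--         row_height = max(row_height, h)
--
--     return positions
-- ===== SOURCE B (Python) =====
-- def _calculate_layout(comments_to_place, screen_w, screen_h):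
--     # Two-pass shelf packing: first partition into rows (recording x and row height),
--     # then assign y coordinates row by row from the bottom.
--     comments_to_place.sort(key=lambda item: item[2], reverse=True)
--     margin = 10
--     spacing = 5
--     limit = screen_w - margin
--     rows = []
--     cur, cur_h = [], 0
--     cursor_x = margin
--     for text, w, h, _ in comments_to_place:
--         if cursor_x + w > limit:
--             rows.append((cur, cur_h))
--             cur, cur_h = [], 0
--             cursor_x = margin
--         cur.append((text, cursor_x))
--         cursor_x += w + spacing
--         cur_h = max(cur_h, h)
--     rows.append((cur, cur_h))
--     positions = {}
--     cursor_y = screen_h - margin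
--     for members, row_h in rows:
--         for text, x in members:
--             positions[text] = (x, cursor_y)
--         cursor_y -= row_h + spacing
--     return positions
-- ===== Notes on version B (the rewrite author's own statement) =====
-- stated objective: alternative
-- what changed: Replaces A's single stateful loop (which interleaves x/y cursor updates and dict writes) by a two-pass shelf packing: pass 1 partitions the sorted comments into rows recording each item's x and each row's max height, pass 2 walks the rows assigning y coordinates from the bottom.
import Mathlib
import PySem

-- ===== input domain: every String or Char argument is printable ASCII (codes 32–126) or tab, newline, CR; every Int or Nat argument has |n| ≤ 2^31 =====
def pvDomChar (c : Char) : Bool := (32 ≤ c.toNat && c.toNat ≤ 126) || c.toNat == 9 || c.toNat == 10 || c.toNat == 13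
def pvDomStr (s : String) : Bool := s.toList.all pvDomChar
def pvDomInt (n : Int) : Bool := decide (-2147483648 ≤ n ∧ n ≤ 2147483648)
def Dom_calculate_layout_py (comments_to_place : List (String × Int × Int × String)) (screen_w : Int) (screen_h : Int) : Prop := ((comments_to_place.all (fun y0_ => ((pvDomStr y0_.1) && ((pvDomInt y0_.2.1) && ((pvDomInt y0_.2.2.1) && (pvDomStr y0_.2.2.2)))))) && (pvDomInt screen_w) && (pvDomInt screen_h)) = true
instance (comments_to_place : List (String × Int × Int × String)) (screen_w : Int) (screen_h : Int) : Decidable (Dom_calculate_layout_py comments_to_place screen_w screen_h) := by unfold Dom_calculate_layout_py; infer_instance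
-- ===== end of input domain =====

-- B replaces A's single stateful placement loop by a two-pass shelf packing (partition into
-- rows with x positions, then assign y row by row); alternative decomposition, same cost.
-- A sorts its argument in place; the equivalence proved here is about the RETURN value only
-- (B performs the same in-place sort in Python).

-- ===== PORT A =====
-- loop body of A's for-loop, as a helper (state: positions, cursor_x, cursor_y, row_height)
def pvAstep (screen_w : Int)
    (st : PySem.Dict String (Int × Int) × Int × Int × Int)
    (item : String × Int × Int × String) :
    PySem.Dict String (Int × Int) × Int × Int × Int :=
  let cursor_x := st.2.1
  let cursor_y := st.2.2.1
  let row_height := st.2.2.2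
  let (cursor_x, cursor_y, row_height) :=
    if cursor_x + item.2.1 > screen_w - 10 then
      ((10 : Int), cursor_y - (row_height + 5), (0 : Int))
    else (cursor_x, cursor_y, row_height)
  (st.1.insert item.1 (cursor_x, cursor_y), cursor_x + item.2.1 + 5, cursor_y,
    max row_height item.2.2.1)

def calculate_layout_py (comments_to_place : List (String × Int × Int × String)) (screen_w : Int) (screen_h : Int) : List (String × Int × Int) :=
  let sortedc := PySem.List.sorted comments_to_place (fun item => item.2.2.1) true
  let fin := sortedc.foldl (pvAstep screen_w) (PySem.Dict.empty, 10, screen_h - 10, 0)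
  fin.1.items.map (fun p => (p.1, p.2.1, p.2.2))

-- ===== PORT B =====
-- pass-1 loop body (state: rows, cur, cur_h, cursor_x)
def pvBstep1 (screen_w : Int)
    (st : List (List (String × Int) × Int) × List (String × Int) × Int × Int)
    (item : String × Int × Int × String) :
    List (List (String × Int) × Int) × List (String × Int) × Int × Int :=
  let (rows, cur, cur_h, cursor_x) :=
    if st.2.2.2 + item.2.1 > screen_w - 10 then
      (st.1 ++ [(st.2.1, st.2.2.1)], ([] : List (String × Int)), (0 : Int), (10 : Int))
    else (st.1, st.2.1, st.2.2.1, st.2.2.2)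
  (rows, cur ++ [(item.1, cursor_x)], max cur_h item.2.2.1, cursor_x + item.2.1 + 5)

-- inner loop of pass 2: place one row's members at height cursor_y
def pvPlaceRow (cursor_y : Int) (positions : PySem.Dict String (Int × Int))
    (members : List (String × Int)) : PySem.Dict String (Int × Int) :=
  members.foldl (fun d m => d.insert m.1 (m.2, cursor_y)) positions

-- pass-2 loop body (state: positions, cursor_y)
def pvBstep2 (st : PySem.Dict String (Int × Int) × Int)
    (row : List (String × Int) × Int) : PySem.Dict String (Int × Int) × Int :=
  (pvPlaceRow st.2 st.1 row.1, st.2 - (row.2 + 5))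

def calculate_layout_py_alt (comments_to_place : List (String × Int × Int × String)) (screen_w : Int) (screen_h : Int) : List (String × Int × Int) :=
  let sortedc := PySem.List.sorted comments_to_place (fun item => item.2.2.1) true
  let p1 := sortedc.foldl (pvBstep1 screen_w) ([], [], 0, 10)
  let rows := p1.1 ++ [(p1.2.1, p1.2.2.1)]
  let fin := rows.foldl pvBstep2 (PySem.Dict.empty, screen_h - 10)
  fin.1.items.map (fun p => (p.1, p.2.1, p.2.2))

-- ===== PRECONDITION & SPEC =====
def Spec_calculate_layout_py (comments_to_place : List (String × Int × Int × String)) (screen_w : Int) (screen_h : Int) (out : List (String × Int × Int)) : Prop := out = calculate_layout_py_alt comments_to_place screen_w screen_h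
instance (comments_to_place : List (String × Int × Int × String)) (screen_w : Int) (screen_h : Int) (out : List (String × Int × Int)) : Decidable (Spec_calculate_layout_py comments_to_place screen_w screen_h out) := by unfold Spec_calculate_layout_py; infer_instance

-- ===== CLAIM (what is proved, stated in full; the proofs are below) =====
def Claim_equal_calculate_layout_py : Prop := ∀ (comments_to_place : List (String × Int × Int × String)) (screen_w : Int) (screen_h : Int), Dom_calculate_layout_py comments_to_place screen_w screen_h → Spec_calculate_layout_py comments_to_place screen_w screen_h (calculate_layout_py comments_to_place screen_w screen_h)

-- ===== LEMMAS AND PROOFS =====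

-- rows produced by B's pass 1 from a partial current row, written recursively
def pvRows (sw : Int) : List (String × Int × Int × String) → List (String × Int) → Int → Int →
    List (List (String × Int) × Int)
  | [], cur, ch, _ => [(cur, ch)]
  | item :: l, cur, ch, cx =>
    if cx + item.2.1 > sw - 10 then
      (cur, ch) :: pvRows sw l [(item.1, 10)] (max 0 item.2.2.1) (10 + item.2.1 + 5)
    else
      pvRows sw l (cur ++ [(item.1, cx)]) (max ch item.2.2.1) (cx + item.2.1 + 5)

-- B's pass 2, written recursively
def pvPlace : List (List (String × Int) × Int) → PySem.Dict String (Int × Int) → Int →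
    PySem.Dict String (Int × Int)
  | [], pos, _ => pos
  | (m, h) :: rs, pos, cy => pvPlace rs (pvPlaceRow cy pos m) (cy - (h + 5))

theorem pvB1_eq_rows (sw : Int) (l : List (String × Int × Int × String)) :
    ∀ (racc : List (List (String × Int) × Int)) (cur : List (String × Int)) (ch cx : Int),
    (let r := l.foldl (pvBstep1 sw) (racc, cur, ch, cx);
      r.1 ++ [(r.2.1, r.2.2.1)]) = racc ++ pvRows sw l cur ch cx := by
  induction l with
  | nil => intro racc cur ch cx; simp [pvRows]
  | cons item l ih =>
    intro racc cur ch cx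
    simp only [List.foldl_cons, pvBstep1, pvRows]
    by_cases h : cx + item.2.1 > sw - 10
    · simp only [h, ite_true]
      rw [ih]
      simp
    · simp only [h, ite_false]
      rw [ih]

theorem pvB2_eq_place (rows : List (List (String × Int) × Int)) :
    ∀ (pos : PySem.Dict String (Int × Int)) (cy : Int),
    (rows.foldl pvBstep2 (pos, cy)).1 = pvPlace rows pos cy := by
  induction rows with
  | nil => intro pos cy; simp [pvPlace]
  | cons r rs ih =>
    intro pos cy
    obtain ⟨m, h⟩ := r
    simp only [List.foldl_cons, pvBstep2, pvPlace]
    exact ih _ _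

theorem pvRows_extend (sw : Int) (l : List (String × Int × Int × String)) :
    ∀ (cur' : List (String × Int)) (ch cx : Int),
    ∃ m h rs, pvRows sw l cur' ch cx = (m, h) :: rs ∧
      ∀ cur, pvRows sw l (cur ++ cur') ch cx = (cur ++ m, h) :: rs := by
  induction l with
  | nil =>
    intro cur' ch cx
    exact ⟨cur', ch, [], rfl, fun cur => rfl⟩
  | cons item l ih =>
    intro cur' ch cx
    by_cases hov : cx + item.2.1 > sw - 10
    · refine ⟨cur', ch, pvRows sw l [(item.1, 10)] (max 0 item.2.2.1) (10 + item.2.1 + 5),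
        ?_, fun cur => ?_⟩ <;> simp [pvRows, hov]
    · obtain ⟨m, h, rs, h1, h2⟩ := ih (cur' ++ [(item.1, cx)]) (max ch item.2.2.1) (cx + item.2.1 + 5)
      refine ⟨m, h, rs, ?_, fun cur => ?_⟩
      · simpa [pvRows, hov] using h1
      · have := h2 cur
        simp only [pvRows, if_neg hov, ← List.append_assoc] at *
        exact this

theorem pvMain (sw : Int) (l : List (String × Int × Int × String)) :
    ∀ (pos : PySem.Dict String (Int × Int)) (cx cy ch : Int),
    (l.foldl (pvAstep sw) (pos, cx, cy, ch)).1 = pvPlace (pvRows sw l [] ch cx) pos cy := by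
  induction l with
  | nil => intro pos cx cy ch; simp [pvRows, pvPlace, pvPlaceRow]
  | cons item l ih =>
    intro pos cx cy ch
    by_cases hov : cx + item.2.1 > sw - 10
    · obtain ⟨m, h, rs, h1, h2⟩ := pvRows_extend sw l [] (max 0 item.2.2.1) (10 + item.2.1 + 5)
      have h2' := h2 [(item.1, 10)]
      simp only [List.append_nil] at h1 h2'
      simp only [List.foldl_cons, pvAstep, if_pos hov, pvRows]
      rw [ih, h1, h2']
      simp [pvPlace, pvPlaceRow]
    · obtain ⟨m, h, rs, h1, h2⟩ := pvRows_extend sw l [] (max ch item.2.2.1) (cx + item.2.1 + 5)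
      have h2' := h2 [(item.1, cx)]
      simp only [List.append_nil] at h1 h2'
      simp only [List.foldl_cons, pvAstep, if_neg hov, pvRows]
      rw [ih]
      simp only [List.nil_append] at h2' ⊢
      rw [h2', h1]
      simp [pvPlace, pvPlaceRow]

-- ===== VERDICT (by name: the statement is the Claim_ definition above) =====
theorem calculate_layout_py_spec : Claim_equal_calculate_layout_py := by
  intro comments_to_place screen_w screen_h _
  unfold Spec_calculate_layout_py
  simp only [calculate_layout_py, calculate_layout_py_alt]
  have hB := pvB1_eq_rows screen_w
    (PySem.List.sorted comments_to_place (fun item => item.2.2.1) true) [] [] 0 10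
  simp only [List.nil_append] at hB
  rw [pvMain, hB, pvB2_eq_place]
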